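-- pv_equiv track=rewrite | github.com/Hygens/hackerearth_hackerrank_solutions | python_problems_competitive/Unique_Subarrays.py | count
-- ===== SOURCE A (Python) =====
-- def count(m):
--     s = 0
--     for k in range(1,m+1):
--         if k==1 or k==m:
--             s+=m
--         elif k==2:
--             s+=(m-1)*2
--         elif k>2 and k<m:
--             s+=(m-(k-1))*k
--     return s
-- ===== SOURCE B (Python) =====
-- def count(m):
--     if m <= 0:
--         return 0
--     return m * (m + 1) * (m + 2) // 6
-- ===== Notes on version B (the rewrite author's own statement) =====
-- stated objective: faster
-- what changed: Replaces the O(m) loop over k (whose branches all add (m-k+1)*k) by the closed form m(m+1)(m+2)/6.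
import Mathlib
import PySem

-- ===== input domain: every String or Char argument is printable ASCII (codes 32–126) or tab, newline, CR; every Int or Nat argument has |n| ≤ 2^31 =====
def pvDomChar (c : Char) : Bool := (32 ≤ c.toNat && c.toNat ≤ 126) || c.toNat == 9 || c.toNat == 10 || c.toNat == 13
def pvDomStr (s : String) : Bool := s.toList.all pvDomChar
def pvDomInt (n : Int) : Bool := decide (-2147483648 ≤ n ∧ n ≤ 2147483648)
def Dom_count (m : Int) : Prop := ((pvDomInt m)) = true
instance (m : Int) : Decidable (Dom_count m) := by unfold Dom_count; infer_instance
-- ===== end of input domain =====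

-- B replaces A's O(m) loop by the closed form m(m+1)(m+2)//6 (0 for m ≤ 0): faster (asymptotic).

-- ===== PORT A =====
def count (m : Int) : Int :=
  (PySem.List.pyRange 1 (m + 1) 1).foldl
    (fun s k =>
      if k == 1 || k == m then s + m
      else if k == 2 then s + (m - 1) * 2
      else if k > 2 && k < m then s + (m - (k - 1)) * k
      else s) 0

-- ===== PORT B =====
def count_alt (m : Int) : Int :=
  if m ≤ 0 then 0 else PySem.Int.floordiv (m * (m + 1) * (m + 2)) 6

-- ===== PRECONDITION & SPEC =====
def Spec_count (m : Int) (out : Int) : Prop := out = count_alt m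
instance (m : Int) (out : Int) : Decidable (Spec_count m out) := by unfold Spec_count; infer_instance

-- ===== CLAIM (what is proved, stated in full; the proofs are below) =====
def Claim_equal_count : Prop := ∀ (m : Int), Dom_count m → Spec_count m (count m)

-- ===== LEMMAS AND PROOFS =====

-- every branch of A's loop body adds (m - k + 1) * k when 1 ≤ k ≤ m
lemma count_body_eq (m k s : Int) (h1 : 1 ≤ k) (h2 : k ≤ m) :
    (if k == 1 || k == m then s + m
     else if k == 2 then s + (m - 1) * 2
     else if k > 2 && k < m then s + (m - (k - 1)) * k
     else s) = s + (m - k + 1) * k := by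
  simp only [beq_iff_eq, Bool.or_eq_true, decide_eq_true_eq, Bool.and_eq_true, gt_iff_lt]
  split_ifs with hc1 hc2 hc3
  · rcases hc1 with h | h <;> subst h <;> ring
  · subst hc2; ring
  · ring
  · exfalso; omega

lemma sum_split (c : Int) (xs : List Int) :
    (xs.map (fun k => (c - k + 1) * k)).sum
      = (c + 1) * (xs.map (fun k => k)).sum - (xs.map (fun k => k * k)).sum := by
  induction xs with
  | nil => simp
  | cons x xs ih => simp [ih]; ring

lemma sum_k (m : Int) (hm : 0 ≤ m) :
    ((PySem.List.pyRange 1 (m + 1) 1).map (fun k => k)).sum * 2 = m * (m + 1) := by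
  induction m, hm using Int.le_induction with
  | base => simp [PySem.List.pyRange_one_eq_nil]
  | succ n hn ih =>
    rw [show n + 1 + 1 = (n + 1) + 1 by ring,
      PySem.List.pyRange_one_succ_right (by omega)]
    simp only [List.map_append, List.sum_append, List.map_cons, List.map_nil,
      List.sum_cons, List.sum_nil]
    nlinarith [ih]

lemma sum_k2 (m : Int) (hm : 0 ≤ m) :
    ((PySem.List.pyRange 1 (m + 1) 1).map (fun k => k * k)).sum * 6 = m * (m + 1) * (2 * m + 1) := by
  induction m, hm using Int.le_induction with
  | base => simp [PySem.List.pyRange_one_eq_nil]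
  | succ n hn ih =>
    rw [show n + 1 + 1 = (n + 1) + 1 by ring,
      PySem.List.pyRange_one_succ_right (by omega)]
    simp only [List.map_append, List.sum_append, List.map_cons, List.map_nil,
      List.sum_cons, List.sum_nil]
    nlinarith [ih]

lemma count_eq_sum (m : Int) :
    count m = ((PySem.List.pyRange 1 (m + 1) 1).map (fun k => (m - k + 1) * k)).sum := by
  unfold count
  rw [PySem.List.foldl_congr_mem _ _ (fun s k => s + (m - k + 1) * k) _
      (by
        intro s k hk
        rw [PySem.List.mem_pyRange_one] at hk
        exact count_body_eq m k s (by omega) (by omega))]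
  rw [PySem.List.foldl_add]
  simp

-- ===== VERDICT (by name: the statement is the Claim_ definition above) =====
theorem count_spec : Claim_equal_count := by
  intro m _
  unfold Spec_count count_alt
  by_cases hm : m ≤ 0
  · simp [hm, count_eq_sum, PySem.List.pyRange_one_eq_nil (by omega : m + 1 ≤ 1)]
  · simp only [hm, if_false]
    have hm' : (0:Int) ≤ m := by omega
    have h1 := sum_k m hm'
    have h2 := sum_k2 m hm'
    rw [count_eq_sum, sum_split, eq_comm,
      PySem.Int.floordiv_eq_iff_of_pos (by norm_num : (0:Int) < 6)]
    constructor <;> nlinarith [h1, h2]
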